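-- pv_equiv track=rewrite | github.com/MG-RA/quartz | irrev/irrev/commands/registry.py | _first_paragraph_under_heading
-- ===== SOURCE A (Python) =====
-- def _first_paragraph_under_heading(content: str, heading: str) -> str | None:
--     if heading not in content:
--         return None
--     start = content.index(heading) + len(heading)
--     end = content.find("\n## ", start)
--     if end == -1:
--         end = len(content)
--     block = content[start:end].strip()
--     for para in block.split("\n\n"):
--         candidate = para.strip()
--         if not candidate:
--             continue
--         if candidate.startswith(">"):
--             continue
--         return candidate
--     return None
-- ===== SOURCE B (Python) =====
-- def _first_paragraph_under_heading(content: str, heading: str) -> str | None: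
--     pos = content.find(heading)
--     if pos == -1:
--         return None
--     rest = content[pos + len(heading):]
--     cut = rest.find("\n## ")
--     section = (rest if cut == -1 else rest[:cut]).strip()
--     buf = None  # lines of the paragraph currently being collected, joined
--     for line in section.split("\n"):
--         if line:
--             buf = line if buf is None else buf + "\n" + line
--         else:
--             if buf is not None:
--                 cand = buf.strip()
--                 if cand and not cand.startswith(">"):
--                     return cand
--                 buf = None
--     if buf is not None:
--         cand = buf.strip()
--         if cand and not cand.startswith(">"):
--             return cand
--     return None
-- ===== Notes on version B (the rewrite author's own statement) =====
-- stated objective: alternative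
-- what changed: Instead of slicing the section, stripping it and splitting it on '\n\n' into a list of paragraph blocks that a second loop scans, B walks the section's lines once, growing a paragraph buffer and flushing/testing it at every empty line and at the end.
import Mathlib
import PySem

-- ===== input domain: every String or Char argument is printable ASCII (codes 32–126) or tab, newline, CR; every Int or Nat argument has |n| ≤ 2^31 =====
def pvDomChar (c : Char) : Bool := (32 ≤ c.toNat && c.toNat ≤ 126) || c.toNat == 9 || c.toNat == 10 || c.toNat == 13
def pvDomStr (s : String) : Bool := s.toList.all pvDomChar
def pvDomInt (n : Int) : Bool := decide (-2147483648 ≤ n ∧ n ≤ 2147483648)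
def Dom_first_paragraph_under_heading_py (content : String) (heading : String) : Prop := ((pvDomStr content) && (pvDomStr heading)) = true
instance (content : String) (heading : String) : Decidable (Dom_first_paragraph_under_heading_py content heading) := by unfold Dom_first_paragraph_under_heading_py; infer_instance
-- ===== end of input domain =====

-- B replaces A's strip-then-split("\n\n")-then-scan over the segment list by a single
-- line-by-line scan that grows a paragraph buffer and flushes it at empty lines (objective: alternative, not faster).

-- ===== PORT A =====
-- the loop 'for para in block.split("\n\n"): ...' with continue / early return
def pvALoop : List (List Char) → Option (List Char)
  | [] => none
  | p :: ps =>
    let c := PySem.Chars.strip p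
    if c.isEmpty then pvALoop ps
    else if PySem.Chars.startswith c ['>'] then pvALoop ps
    else some c

def first_paragraph_under_heading_py (content : String) (heading : String) : Option String :=
  let cl := content.toList
  let hl := heading.toList
  if PySem.Chars.isIn hl cl = false then none
  else
    let start : Int := PySem.Chars.find cl hl + (hl.length : Int)
    let e : Int := PySem.Chars.findFrom cl ['\n', '#', '#', ' '] start
    let e : Int := if e = -1 then (cl.length : Int) else e
    let block := PySem.Chars.strip (PySem.List.slice cl (some start) (some e))
    (pvALoop (PySem.Chars.splitOn block ['\n', '\n'])).map String.ofList

-- ===== PORT B =====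
-- the 'for line in section.split("\n")' loop with its paragraph buffer, and the trailing flush
def pvFlush : Option (List Char) → Option (List Char)
  | none => none
  | some b =>
    let c := PySem.Chars.strip b
    if c.isEmpty then none
    else if PySem.Chars.startswith c ['>'] then none
    else some c

def pvGrow (buf : Option (List Char)) (l : List Char) : List Char :=
  match buf with
  | none => l
  | some b => b ++ '\n' :: l

def pvBLoop (buf : Option (List Char)) : List (List Char) → Option (List Char)
  | [] => pvFlush buf
  | l :: ls =>
    if l.isEmpty then
      match pvFlush buf with
      | some c => some c
      | none => pvBLoop none ls
    else pvBLoop (some (pvGrow buf l)) ls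

def first_paragraph_under_heading_py_alt (content : String) (heading : String) : Option String :=
  let cl := content.toList
  let hl := heading.toList
  let pos := PySem.Chars.find cl hl
  if pos = -1 then none
  else
    let rest := PySem.List.slice cl (some (pos + (hl.length : Int))) none
    let cut := PySem.Chars.find rest ['\n', '#', '#', ' ']
    let section_ := PySem.Chars.strip
      (if cut = -1 then rest else PySem.List.slice rest none (some cut))
    (pvBLoop none (PySem.Chars.splitOn section_ ['\n'])).map String.ofList


-- ===== PRECONDITION & SPEC =====
def Spec_first_paragraph_under_heading_py (content : String) (heading : String) (out : Option String) : Prop := out = first_paragraph_under_heading_py_alt content heading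
instance (content : String) (heading : String) (out : Option String) : Decidable (Spec_first_paragraph_under_heading_py content heading out) := by unfold Spec_first_paragraph_under_heading_py; infer_instance

-- ===== CLAIM (what is proved, stated in full; the proofs are below) =====
def Claim_equal_first_paragraph_under_heading_py : Prop := ∀ (content : String) (heading : String), Dom_first_paragraph_under_heading_py content heading → Spec_first_paragraph_under_heading_py content heading (first_paragraph_under_heading_py content heading)

-- ===== LEMMAS AND PROOFS =====

-- a clean structural form of Python's str.split(sep) for a nonempty sep c0 :: s0
def pySplit (c0 : Char) (s0 : List Char) (l : List Char) : List (List Char) :=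
  if h : (c0 :: s0).isPrefixOf l then
    [] :: pySplit c0 s0 (l.drop (s0.length + 1))
  else
    match l with
    | [] => [[]]
    | c :: rest => List.modifyHead (c :: ·) (pySplit c0 s0 rest)
termination_by l.length
decreasing_by
  · have hle := List.IsPrefix.length_le (List.isPrefixOf_iff_prefix.mp h)
    simp at hle ⊢
    omega
  · simp

theorem pySplit_nil (c0 : Char) (s0 : List Char) : pySplit c0 s0 [] = [[]] := by
  rw [pySplit]
  simp [List.isPrefixOf]

theorem pySplit_pos (c0 : Char) (s0 : List Char) {l : List Char}
    (h : (c0 :: s0).isPrefixOf l = true) :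
    pySplit c0 s0 l = [] :: pySplit c0 s0 (l.drop (s0.length + 1)) := by
  rw [pySplit]
  simp [h]

theorem pySplit_cons (c0 : Char) (s0 : List Char) {c : Char} {rest : List Char}
    (h : ¬ (c0 :: s0).isPrefixOf (c :: rest) = true) :
    pySplit c0 s0 (c :: rest) = List.modifyHead (c :: ·) (pySplit c0 s0 rest) := by
  rw [pySplit]
  simp [h]

theorem splitOn_go_eq (c0 : Char) (s0 : List Char) :
    ∀ (fuel : Nat) (l cur : List Char) (accs : List (List Char)),
      l.length < fuel →
      PySem.Chars.splitOn.go (c0 :: s0) fuel l cur accs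
        = accs.reverse ++ List.modifyHead (fun x => cur.reverse ++ x) (pySplit c0 s0 l) := by
  intro fuel
  induction fuel with
  | zero => intro l cur accs h; omega
  | succ f ih =>
    intro l cur accs h
    cases l with
    | nil =>
      rw [PySem.Chars.splitOn.go]
      · rw [pySplit_nil]
        simp
      · omega
    | cons c rest =>
      by_cases hp : (c0 :: s0).isPrefixOf (c :: rest) = true
      · rw [PySem.Chars.splitOn.go]
        simp only [hp, if_pos]
        have hle := List.IsPrefix.length_le (List.isPrefixOf_iff_prefix.mp hp)
        simp only [List.length_cons] at hle h
        rw [ih (List.drop (c0 :: s0).length (c :: rest)) [] (cur.reverse :: accs)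
            (by simp; omega)]
        rw [pySplit_pos c0 s0 hp]
        simp
        cases pySplit c0 s0 (List.drop s0.length rest) <;> rfl
      · rw [PySem.Chars.splitOn.go]
        simp only [hp, if_neg, Bool.false_eq_true, not_false_iff, ite_false]
        rw [ih rest (c :: cur) accs (by simp at h ⊢; omega)]
        rw [pySplit_cons c0 s0 hp]
        cases pySplit c0 s0 rest <;> simp

theorem splitOn_eq (c0 : Char) (s0 : List Char) (l : List Char) :
    PySem.Chars.splitOn l (c0 :: s0) = pySplit c0 s0 l := by
  unfold PySem.Chars.splitOn
  have h := splitOn_go_eq c0 s0 (l.length + 1) l [] [] (by omega)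
  rw [h]
  cases hh : pySplit c0 s0 l <;> simp

-- ===== strip lemmas =====
theorem pvLstrip_cons_ws {c : Char} (h : PySem.Chars.isspace c = true) (x : List Char) :
    PySem.Chars.lstrip (c :: x) = PySem.Chars.lstrip x := by
  simp [PySem.Chars.lstrip, List.dropWhile, h]

theorem pvStrip_cons_ws {c : Char} (h : PySem.Chars.isspace c = true) (x : List Char) :
    PySem.Chars.strip (c :: x) = PySem.Chars.strip x := by
  simp [PySem.Chars.strip, pvLstrip_cons_ws h]

theorem pvRstrip_append_ws {c : Char} (h : PySem.Chars.isspace c = true) (x : List Char) :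
    PySem.Chars.rstrip (x ++ [c]) = PySem.Chars.rstrip x := by
  simp [PySem.Chars.rstrip, List.dropWhile, h]

theorem pvStrip_append_ws {c : Char} (h : PySem.Chars.isspace c = true) (x : List Char) :
    PySem.Chars.strip (x ++ [c]) = PySem.Chars.strip x := by
  unfold PySem.Chars.strip
  unfold PySem.Chars.lstrip
  rw [List.dropWhile_append]
  split
  · rename_i he
    rw [List.isEmpty_iff] at he
    rw [he]
    simp [List.dropWhile, h]
  · exact pvRstrip_append_ws h _

theorem pvWsNl : PySem.Chars.isspace '\n' = true := by decide

-- ===== candidate check =====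
def pvCheck (p : List Char) : Option (List Char) :=
  let c := PySem.Chars.strip p
  if c.isEmpty then none
  else if PySem.Chars.startswith c ['>'] then none
  else some c

theorem pvALoop_cons (p : List Char) (ps : List (List Char)) :
    pvALoop (p :: ps) = match pvCheck p with | some c => some c | none => pvALoop ps := by
  simp only [pvALoop, pvCheck]
  split_ifs <;> rfl

theorem pvFlush_some (b : List Char) : pvFlush (some b) = pvCheck b := rfl

theorem pvCheck_congr {p q : List Char} (h : PySem.Chars.strip p = PySem.Chars.strip q) :
    pvCheck p = pvCheck q := by
  simp [pvCheck, h]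

theorem pvCheck_ws_nil : pvCheck [] = none := by decide

theorem pvCheck_nl : pvCheck ['\n'] = none := by decide

-- ===== the two loops as functions of the remaining raw text =====
def pvG (acc cs : List Char) : Option (List Char) :=
  pvALoop (List.modifyHead (fun x => acc ++ x) (pySplit '\n' ['\n'] cs))

def pvH (buf : Option (List Char)) (lacc cs : List Char) : Option (List Char) :=
  pvBLoop buf (List.modifyHead (fun x => lacc ++ x) (pySplit '\n' [] cs))

theorem pvG_nil (acc : List Char) : pvG acc [] = pvCheck acc := by
  rw [pvG, pySplit_nil]
  simp only [List.modifyHead]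
  rw [pvALoop_cons]
  simp only [List.append_nil]
  cases h : pvCheck acc <;> simp [h, pvALoop]

theorem pvG_nn (acc t : List Char) :
    pvG acc ('\n' :: '\n' :: t)
      = match pvCheck acc with | some c => some c | none => pvG [] t := by
  rw [pvG, pySplit_pos '\n' ['\n'] (by simp [List.isPrefixOf])]
  simp only [List.length_cons, List.length_nil, List.drop_succ_cons, List.drop_zero,
    List.modifyHead, List.append_nil]
  rw [pvALoop_cons]
  rw [pvG]
  cases pySplit '\n' ['\n'] t <;> rfl

theorem pvG_one (acc : List Char) {c : Char} {r : List Char}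
    (h : ¬ (['\n', '\n'] : List Char).isPrefixOf (c :: r) = true) :
    pvG acc (c :: r) = pvG (acc ++ [c]) r := by
  rw [pvG, pySplit_cons _ _ h, pvG]
  cases pySplit '\n' ['\n'] r <;> simp

theorem pvH_nil (buf : Option (List Char)) (lacc : List Char) :
    pvH buf lacc [] = pvFlush (if lacc.isEmpty then buf else some (pvGrow buf lacc)) := by
  rw [pvH, pySplit_nil]
  simp only [List.modifyHead, List.append_nil]
  by_cases hl : lacc.isEmpty
  · simp only [pvBLoop, hl, if_pos]
    cases h : pvFlush buf <;> simp [hl, pvBLoop, pvFlush, h]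
  · simp [pvBLoop, hl, pvFlush]

theorem pvH_nl (buf : Option (List Char)) (lacc t : List Char) :
    pvH buf lacc ('\n' :: t)
      = if lacc.isEmpty then
          (match pvFlush buf with | some c => some c | none => pvH none [] t)
        else pvH (some (pvGrow buf lacc)) [] t := by
  rw [pvH, pySplit_pos '\n' [] (by simp [List.isPrefixOf])]
  simp only [List.length_nil, List.drop_succ_cons, List.drop_zero, List.modifyHead,
    List.append_nil]
  by_cases hl : lacc.isEmpty
  · simp only [pvBLoop, hl, if_pos]
    cases h : pvFlush buf
    · simp only [h, pvH]
      cases pySplit '\n' [] t <;> rfl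
    · rfl
  · simp only [pvBLoop, hl, if_neg, Bool.false_eq_true, not_false_iff]
    rw [pvH]
    cases pySplit '\n' [] t <;> simp [hl]

theorem pvH_one (buf : Option (List Char)) (lacc : List Char) {c : Char} {r : List Char}
    (h : ¬ (['\n'] : List Char).isPrefixOf (c :: r) = true) :
    pvH buf lacc (c :: r) = pvH buf (lacc ++ [c]) r := by
  rw [pvH, pySplit_cons _ _ h, pvH]
  cases pySplit '\n' [] r <;> simp

theorem pvStrip_pre {pre : List Char} (hpre : pre = [] ∨ pre = ['\n']) (x : List Char) :
    PySem.Chars.strip (pre ++ x) = PySem.Chars.strip x := by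
  rcases hpre with h | h <;> subst h
  · rfl
  · exact pvStrip_cons_ws pvWsNl x

theorem pvGrow_append (buf : Option (List Char)) (lacc : List Char) (c : Char) :
    pvGrow buf lacc ++ [c] = pvGrow buf (lacc ++ [c]) := by
  cases buf <;> simp [pvGrow]

theorem pvBase (pre : List Char) (buf : Option (List Char)) (lacc : List Char)
    (hpre : pre = [] ∨ pre = ['\n']) :
    pvG (pre ++ pvGrow buf lacc) [] = pvH buf lacc [] := by
  rw [pvG_nil, pvH_nil]
  by_cases hl : lacc.isEmpty
  · rw [List.isEmpty_iff] at hl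
    subst hl
    simp only [List.isEmpty_nil, if_pos]
    cases buf with
    | none =>
      show pvCheck (pre ++ ([] : List Char)) = none
      rw [List.append_nil]
      rcases hpre with h | h <;> subst h
      · exact pvCheck_ws_nil
      · exact pvCheck_nl
    | some b =>
      show pvCheck (pre ++ (b ++ ['\n'])) = pvFlush (some b)
      rw [pvFlush_some]
      exact pvCheck_congr (by rw [pvStrip_pre hpre]; exact pvStrip_append_ws pvWsNl b)
  · simp only [hl, if_neg, Bool.false_eq_true, not_false_iff]
    rw [pvFlush_some]
    exact pvCheck_congr (pvStrip_pre hpre _)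

theorem pvMain (n : Nat) :
    ∀ (cs pre : List Char) (buf : Option (List Char)) (lacc : List Char),
      cs.length ≤ n → (pre = [] ∨ pre = ['\n']) →
      (∀ t, cs = '\n' :: t → (lacc ≠ [] ∨ (buf = none ∧ pre = []))) →
      pvG (pre ++ pvGrow buf lacc) cs = pvH buf lacc cs := by
  induction n with
  | zero =>
    intro cs pre buf lacc hn hpre _
    have : cs = [] := by cases cs <;> simp_all
    subst this
    exact pvBase pre buf lacc hpre
  | succ n ih =>
    intro cs pre buf lacc hn hpre hhead
    cases cs with
    | nil => exact pvBase pre buf lacc hpre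
    | cons c r =>
      by_cases hc : c = '\n'
      case neg =>
        have hbc : (('\n' : Char) == c) = false := beq_eq_false_iff_ne.mpr (Ne.symm hc)
        have hnn : ¬ (['\n', '\n'] : List Char).isPrefixOf (c :: r) = true := by
          simp [List.isPrefixOf, hbc]
        have hn1 : ¬ (['\n'] : List Char).isPrefixOf (c :: r) = true := by
          simp [List.isPrefixOf, hbc]
        rw [pvG_one _ hnn, pvH_one _ _ hn1]
        rw [List.append_assoc, show (([c] : List Char)) = [c] from rfl]
        rw [show pre ++ (pvGrow buf lacc ++ [c]) = pre ++ pvGrow buf (lacc ++ [c]) by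
          rw [pvGrow_append]]
        apply ih r pre buf (lacc ++ [c]) (by simp at hn; omega) hpre
        intro t _
        left
        simp
      case pos =>
        subst hc
        have hl := hhead r rfl
        cases r with
        | nil =>
          have hnn : ¬ (['\n', '\n'] : List Char).isPrefixOf (['\n'] : List Char) = true := by
            decide
          rw [pvG_one _ hnn, pvG_nil, pvH_nl]
          by_cases hl2 : lacc.isEmpty
          · rw [List.isEmpty_iff] at hl2
            subst hl2
            rcases hl with h | ⟨hb, hp⟩
            · exact absurd rfl h
            · subst hb; subst hp
              simp only [List.isEmpty_nil, if_pos]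
              show pvCheck (([] : List Char) ++ [] ++ ['\n']) = _
              rw [show (([] : List Char) ++ [] ++ ['\n']) = ['\n'] from rfl, pvCheck_nl]
              simp [pvH_nil, pvFlush]
          · simp only [hl2, if_neg, Bool.false_eq_true, not_false_iff]
            rw [pvH_nil]
            simp only [List.isEmpty_nil, if_pos]
            rw [pvFlush_some]
            apply pvCheck_congr
            rw [List.append_assoc, pvStrip_pre hpre]
            exact pvStrip_append_ws pvWsNl _
        | cons c2 r2 =>
          by_cases hc2 : c2 = '\n'
          case pos =>
            subst hc2
            rw [pvG_nn, pvH_nl]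
            by_cases hl2 : lacc.isEmpty
            · rw [List.isEmpty_iff] at hl2
              subst hl2
              rcases hl with h | ⟨hb, hp⟩
              · exact absurd rfl h
              · subst hb; subst hp
                simp only [List.isEmpty_nil, if_pos]
                rw [show (([] : List Char) ++ pvGrow none []) = [] from rfl, pvCheck_ws_nil]
                rw [show pvFlush none = none from rfl]
                rw [pvH_nl]
                simp only [List.isEmpty_nil, if_pos]
                rw [show pvFlush none = none from rfl]
                show pvG [] r2 = pvH none [] r2
                have := ih r2 [] none [] (by simp at hn; omega) (Or.inl rfl)
                  (by intro t _; right; exact ⟨rfl, rfl⟩)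
                simpa using this
            · simp only [hl2, if_neg, Bool.false_eq_true, not_false_iff]
              rw [pvH_nl]
              simp only [List.isEmpty_nil, if_pos]
              rw [pvFlush_some]
              rw [show pvCheck (pvGrow buf lacc) = pvCheck (pre ++ pvGrow buf lacc) from
                (pvCheck_congr (pvStrip_pre hpre _)).symm]
              have hrec : pvG [] r2 = pvH none [] r2 := by
                have := ih r2 [] none [] (by simp at hn; omega) (Or.inl rfl)
                  (by intro t _; right; exact ⟨rfl, rfl⟩)
                simpa using this
              cases pvCheck (pre ++ pvGrow buf lacc) <;> simp [hrec]
          case neg =>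
            have hbc2 : (('\n' : Char) == c2) = false := beq_eq_false_iff_ne.mpr (Ne.symm hc2)
            have hnn : ¬ (['\n', '\n'] : List Char).isPrefixOf ('\n' :: c2 :: r2) = true := by
              simp [List.isPrefixOf, hbc2]
            rw [pvG_one _ hnn, pvH_nl]
            by_cases hl2 : lacc.isEmpty
            · rw [List.isEmpty_iff] at hl2
              subst hl2
              rcases hl with h | ⟨hb, hp⟩
              · exact absurd rfl h
              · subst hb; subst hp
                simp only [List.isEmpty_nil, if_pos]
                rw [show pvFlush none = none from rfl]
                have := ih (c2 :: r2) ['\n'] none [] (by simp at hn ⊢; omega) (Or.inr rfl)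
                  (by intro t ht; injection ht with h1 _; exact absurd h1 hc2)
                simpa using this
            · simp only [hl2, if_neg, Bool.false_eq_true, not_false_iff]
              have := ih (c2 :: r2) pre (some (pvGrow buf lacc)) [] (by simp at hn ⊢; omega)
                hpre (by intro t ht; injection ht with h1 _; exact absurd h1 hc2)
              rw [show pvGrow (some (pvGrow buf lacc)) [] = pvGrow buf lacc ++ ['\n'] from rfl]
                at this
              rw [← this, List.append_assoc]

theorem pvModifyHead_nil_append (P : List (List Char)) :
    List.modifyHead (fun x => [] ++ x) P = P := by
  cases P <;> simp

theorem pvTop (cs : List Char) :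
    pvALoop (PySem.Chars.splitOn cs ['\n', '\n']) = pvBLoop none (PySem.Chars.splitOn cs ['\n']) := by
  rw [splitOn_eq '\n' ['\n'] cs, splitOn_eq '\n' [] cs]
  have h := pvMain cs.length cs [] none [] le_rfl (Or.inl rfl) (fun t _ => Or.inr ⟨rfl, rfl⟩)
  rw [pvG, pvH] at h
  simp only [pvGrow, List.append_nil, pvModifyHead_nil_append] at h
  exact h

theorem pvFindFrom_eq (cl sub : List Char) (start : Int) (h0 : 0 ≤ start)
    (hle : start ≤ (cl.length : Int)) :
    PySem.Chars.findFrom cl sub start none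
      = (if PySem.Chars.find (cl.drop start.toNat) sub = -1 then -1
         else start + PySem.Chars.find (cl.drop start.toNat) sub) := by
  unfold PySem.Chars.findFrom
  simp only [not_lt.mpr h0, if_neg, List.take_length]
  have h1 : ¬ ((cl.length : Int) < start) := not_lt.mpr hle
  have h2 : ¬ (start < 0) := not_lt.mpr h0
  simp [h1, h2, List.take_length]
theorem pvPorts_eq (content heading : String) :
    first_paragraph_under_heading_py content heading
      = first_paragraph_under_heading_py_alt content heading := by
  rw [first_paragraph_under_heading_py, first_paragraph_under_heading_py_alt]
  by_cases h : PySem.Chars.find content.toList heading.toList = -1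
  · simp [PySem.Chars.isIn, h]
  · have hguard : (PySem.Chars.isIn heading.toList content.toList = false) = False := by
      simp [PySem.Chars.isIn, h]
    simp only [hguard, if_false, h, if_neg, not_false_iff]
    have hpos : 0 ≤ PySem.Chars.find content.toList heading.toList := by
      have := PySem.Chars.neg_one_le_find content.toList heading.toList
      omega
    have hspec := (PySem.Chars.find_spec hpos).1
    have hlen := List.IsPrefix.length_le hspec
    rw [List.length_drop] at hlen
    set cl := content.toList with hcl
    set hl := heading.toList with hhl
    set pos := PySem.Chars.find cl hl with hposdef
    set start : Int := pos + (hl.length : Int) with hstart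
    have hfl := PySem.Chars.find_le_length cl hl
    have hs0 : 0 ≤ start := by omega
    have hsle : start ≤ (cl.length : Int) := by omega
    have hrest : PySem.List.slice cl (some start) none = cl.drop start.toNat :=
      PySem.List.slice_from cl hs0
    rw [hrest]
    set rest := cl.drop start.toNat with hrestdef
    rw [pvFindFrom_eq cl _ start hs0 hsle]
    set cut := PySem.Chars.find rest ['\n', '#', '#', ' '] with hcut
    have hrestlen : rest.length = cl.length - start.toNat := by
      rw [hrestdef, List.length_drop]
    by_cases hc : cut = -1
    · simp only [hc, if_pos]
      have : PySem.List.slice cl (some start) (some (cl.length : Int)) = rest := by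
        rw [show start = ((start.toNat : Nat) : Int) by omega]
        rw [PySem.List.slice_natCast]
        rw [hrestdef]
        exact List.take_of_length_le (by simp)
      rw [this, pvTop]
    · have hc0 : 0 ≤ cut := by
        have := PySem.Chars.neg_one_le_find rest ['\n', '#', '#', ' ']
        omega
      have hclen : cut ≤ (rest.length : Int) := PySem.Chars.find_le_length rest _
      simp only [hc, if_neg, not_false_iff]
      have hne : ¬ (start + cut = -1) := by omega
      rw [if_neg hne]
      have hA : PySem.List.slice cl (some start) (some (start + cut)) = rest.take cut.toNat := by
        rw [show start + cut = (((start.toNat + cut.toNat) : Nat) : Int) by omega,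
            show start = ((start.toNat : Nat) : Int) by omega]
        rw [PySem.List.slice_natCast]
        rw [hrestdef]
        congr 1
        omega
      have hB : PySem.List.slice rest none (some cut) = rest.take cut.toNat :=
        PySem.List.slice_to rest hc0
      rw [hA, hB, pvTop]

-- ===== VERDICT (by name: the statement is the Claim_ definition above) =====
theorem first_paragraph_under_heading_py_spec : Claim_equal_first_paragraph_under_heading_py := by
  unfold Claim_equal_first_paragraph_under_heading_py
  intro content heading _
  unfold Spec_first_paragraph_under_heading_py
  exact pvPorts_eq content heading
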